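-- pv_equiv track=rewrite | github.com/aremath/sm_rando | world_rando/model_checking.py | all_itemsets
-- ===== SOURCE A (Python) =====
-- from itertools import product, chain, combinations
--
-- def powerset(iterable):
--     n = len(iterable)
--     for r in range(n+1):
--         for combination in combinations(iterable, r):
--             yield combination
--
-- def all_itemsets(start_items, gain_items):
--     out = []
--     for p in powerset(gain_items):
--         s = start_items
--         for i in p:
--             s = s | i
--         out.append(s)
--     return out
-- ===== SOURCE B (Python) =====
-- def all_itemsets(start_items, gain_items):
--     # Backtracking: build each size-r subset's union incrementally, sharing prefix unions.
--     items = list(gain_items)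
--     n = len(items)
--     out = []
--     def rec(start_idx, remaining, s):
--         if remaining == 0:
--             out.append(s)
--             return
--         for idx in range(start_idx, n - remaining + 1):
--             rec(idx + 1, remaining - 1, s | items[idx])
--     for r in range(n + 1):
--         rec(0, r, start_items)
--     return out
-- ===== Notes on version B (the rewrite author's own statement) =====
-- stated objective: alternative
-- what changed: Replaced the itertools.combinations/powerset generator with a recursive backtracking enumeration that carries the running union as an accumulator, sharing union work across subsets with a common prefix instead of re-unioning each subset from start_items.
import Mathlib
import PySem

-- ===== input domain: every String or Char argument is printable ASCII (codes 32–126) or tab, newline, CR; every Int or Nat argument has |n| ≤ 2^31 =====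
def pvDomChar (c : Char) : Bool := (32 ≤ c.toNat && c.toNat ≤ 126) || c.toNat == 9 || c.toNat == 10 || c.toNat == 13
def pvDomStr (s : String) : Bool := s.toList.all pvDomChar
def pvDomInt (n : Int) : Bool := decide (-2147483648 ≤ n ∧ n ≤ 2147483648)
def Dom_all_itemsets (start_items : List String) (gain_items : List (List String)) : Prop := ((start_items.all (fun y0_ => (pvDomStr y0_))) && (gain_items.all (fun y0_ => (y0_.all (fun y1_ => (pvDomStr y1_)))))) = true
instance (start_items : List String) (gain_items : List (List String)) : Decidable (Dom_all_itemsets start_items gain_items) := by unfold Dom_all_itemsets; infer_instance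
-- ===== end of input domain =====

-- B replaces the combinations-generator + per-subset re-union with a backtracking
-- recursion that builds the running union incrementally (alternative decomposition).


-- ===== PORT A =====
-- itertools.combinations(xs, r): all length-r combinations, lexicographic in index order
def pyCombinations (r : Nat) (xs : List (List String)) : List (List (List String)) :=
  match r, xs with
  | 0, _ => [[]]
  | _ + 1, [] => []
  | r + 1, x :: rest => (pyCombinations r rest).map (x :: ·) ++ pyCombinations (r + 1) rest

-- powerset: for r in range(n+1): yield each combination of size r
def powersetA (xs : List (List String)) : List (List (List String)) :=
  (List.range (xs.length + 1)).flatMap (fun r => pyCombinations r xs)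

def all_itemsets (start_items : List String) (gain_items : List (List String)) : List (List String) :=
  (powersetA gain_items).foldl
    (fun out p => out ++ [p.foldl (fun s i => PySem.Set.union s i) start_items]) []

-- ===== PORT B =====
-- rec(start_idx, remaining, s): pick remaining more items from the suffix, in index
-- order, carrying the running union s; appends s when remaining == 0.
def recB : List (List String) → Nat → List String → List (List String)
  | _, 0, s => [s]
  | [], _ + 1, _ => []
  | x :: rest, r + 1, s =>
      recB rest r (PySem.Set.union s x) ++ recB rest (r + 1) s

def all_itemsets_alt (start_items : List String) (gain_items : List (List String)) : List (List String) :=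
  (List.range (gain_items.length + 1)).flatMap (fun r => recB gain_items r start_items)

-- ===== PRECONDITION & SPEC =====
def Spec_all_itemsets (start_items : List String) (gain_items : List (List String)) (out : List (List String)) : Prop := out = all_itemsets_alt start_items gain_items
instance (start_items : List String) (gain_items : List (List String)) (out : List (List String)) : Decidable (Spec_all_itemsets start_items gain_items out) := by unfold Spec_all_itemsets; infer_instance

-- ===== CLAIM (what is proved, stated in full; the proofs are below) =====
def Claim_equal_all_itemsets : Prop := ∀ (start_items : List String) (gain_items : List (List String)), Dom_all_itemsets start_items gain_items → Spec_all_itemsets start_items gain_items (all_itemsets start_items gain_items)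

-- ===== LEMMAS AND PROOFS =====
theorem foldl_append_singleton (f : List (List String) → List String)
    (l : List (List (List String))) (acc : List (List String)) :
    l.foldl (fun out p => out ++ [f p]) acc = acc ++ l.map f := by
  induction l generalizing acc with
  | nil => simp
  | cons x xs ih => simp [List.foldl, ih]

theorem recB_eq_map_combinations (xs : List (List String)) :
    ∀ (r : Nat) (s : List String),
      recB xs r s
        = (pyCombinations r xs).map (fun p => p.foldl (fun s i => PySem.Set.union s i) s) := by
  induction xs with
  | nil =>
      intro r s
      cases r with
      | zero => simp [recB, pyCombinations]
      | succ r => simp [recB, pyCombinations]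
  | cons x rest ih =>
      intro r s
      cases r with
      | zero => simp [recB, pyCombinations]
      | succ r =>
          simp only [recB, pyCombinations, List.map_append, List.map_map, ih]
          rfl

theorem all_itemsets_spec : Claim_equal_all_itemsets := by
  intro start_items gain_items _
  unfold Spec_all_itemsets all_itemsets all_itemsets_alt powersetA
  rw [foldl_append_singleton]
  simp [List.map_flatMap, recB_eq_map_combinations]
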